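-- pv_equiv track=rewrite | github.com/bup/bup | lib/bup/hashsplit.py | _nonresident_page_regions
-- ===== SOURCE A (Python) =====
-- def _nonresident_page_regions(status_bytes, incore_mask, max_region_len=None):
--     """Return (start_page, count) pairs in ascending start_page order for
--     each contiguous region of nonresident pages indicated by the
--     mincore() status_bytes.  Limit the number of pages in each region
--     to max_region_len."""
--     assert(max_region_len is None or max_region_len > 0)
--     start = None
--     for i, x in enumerate(status_bytes):
--         in_core = x & incore_mask
--         if start is None:
--             if not in_core:
--                 start = i
--         else:
--             count = i - start
--             if in_core:
--                 yield (start, count)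
--                 start = None
--             elif max_region_len and count >= max_region_len:
--                 yield (start, count)
--                 start = i
--     if start is not None:
--         yield (start, len(status_bytes) - start)
-- ===== SOURCE B (Python) =====
-- def _nonresident_page_regions(status_bytes, incore_mask, max_region_len=None):
--     """Two-level scan: find each maximal nonresident run, then emit it in
--     max_region_len-sized chunks."""
--     assert(max_region_len is None or max_region_len > 0)
--     n = len(status_bytes)
--     i = 0
--     while i < n:
--         if status_bytes[i] & incore_mask:
--             i += 1
--             continue
--         start = i
--         while i < n and not (status_bytes[i] & incore_mask):
--             i += 1
--         pos, rem = start, i - start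
--         if max_region_len:
--             while rem > max_region_len:
--                 yield (pos, max_region_len)
--                 pos += max_region_len
--                 rem -= max_region_len
--         yield (pos, rem)
-- ===== Notes on version B (the rewrite author's own statement) =====
-- stated objective: alternative
-- what changed: Replaced A's one-pass state machine (Optional run-start plus a per-element split check) by a two-level scan: an outer index loop skips in-core pages, an inner loop finds each maximal nonresident run, and the run is then emitted in max_region_len-sized chunks by a separate arithmetic while-loop.
import Mathlib
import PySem

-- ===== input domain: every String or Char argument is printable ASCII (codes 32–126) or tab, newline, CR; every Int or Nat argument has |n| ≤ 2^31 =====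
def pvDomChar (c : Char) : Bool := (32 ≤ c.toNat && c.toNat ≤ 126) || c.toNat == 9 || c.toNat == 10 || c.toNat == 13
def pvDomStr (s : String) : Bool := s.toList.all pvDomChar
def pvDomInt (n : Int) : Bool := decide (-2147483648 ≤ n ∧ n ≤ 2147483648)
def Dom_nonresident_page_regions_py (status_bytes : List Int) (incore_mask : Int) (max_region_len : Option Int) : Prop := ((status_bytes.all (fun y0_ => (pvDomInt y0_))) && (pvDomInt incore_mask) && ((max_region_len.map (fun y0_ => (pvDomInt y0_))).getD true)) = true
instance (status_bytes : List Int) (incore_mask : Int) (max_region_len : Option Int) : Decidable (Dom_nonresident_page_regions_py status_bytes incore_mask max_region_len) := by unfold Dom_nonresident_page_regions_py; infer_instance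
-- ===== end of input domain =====

-- B changes the decomposition (maximal-run scan + arithmetic chunking instead of A's
-- per-element state machine); same O(n) cost; return-value equivalence of the yielded lists.

-- ===== PORT A =====
-- A's loop: i current index, start? the Optional run start, n = len(status_bytes).
-- `yield` becomes cons onto the rest of the produced list.
def nprA_loop (im : Int) (mrl : Option Int) (n : Int) :
    List Int → Int → Option Int → List (Int × Int)
  | [], _, none => []
  | [], _, some s => [(s, n - s)]                      -- trailing `if start is not None: yield`
  | x :: t, i, none =>
      if PySem.Int.band x im ≠ 0 then nprA_loop im mrl n t (i + 1) none
      else nprA_loop im mrl n t (i + 1) (some i)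
  | x :: t, i, some s =>
      if PySem.Int.band x im ≠ 0 then
        (s, i - s) :: nprA_loop im mrl n t (i + 1) none
      else if (match mrl with
               | some m => decide (m ≠ 0) && decide (m ≤ i - s)   -- `max_region_len and count >= max_region_len`
               | none => false) then
        (s, i - s) :: nprA_loop im mrl n t (i + 1) (some i)
      else nprA_loop im mrl n t (i + 1) (some s)

def nonresident_page_regions_py (status_bytes : List Int) (incore_mask : Int) (max_region_len : Option Int) : List (Int × Int) :=
  nprA_loop incore_mask max_region_len (status_bytes.length : Int) status_bytes 0 none

-- ===== PORT B =====
-- inner scan: length of the maximal leading nonresident run and the remaining suffix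
def nprB_run (im : Int) : List Int → Nat × List Int
  | [] => (0, [])
  | x :: t =>
      if PySem.Int.band x im ≠ 0 then (0, x :: t)
      else ((nprB_run im t).1 + 1, (nprB_run im t).2)

-- termination fact the outer loop cites
theorem nprB_run_len_le (im : Int) (xs : List Int) : (nprB_run im xs).2.length ≤ xs.length := by
  induction xs with
  | nil => simp [nprB_run]
  | cons x t ih =>
      simp only [nprB_run]
      split
      · simp
      · simpa using Nat.le_succ_of_le ih

-- `while rem > max_region_len:` chunk loop (0 < m guard only makes the loop total;
-- under the port's use m ≠ 0 comes from Python's truthiness and m > 0 from the assert)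
def nprB_chunk (pos rem m : Int) : List (Int × Int) :=
  if _h : 0 < m ∧ m < rem then (pos, m) :: nprB_chunk (pos + m) (rem - m) m
  else [(pos, rem)]
termination_by rem.toNat
decreasing_by omega

-- `if max_region_len:` then chunk loop, then the final `yield (pos, rem)`
def nprB_chunkO (pos rem : Int) : Option Int → List (Int × Int)
  | some m => nprB_chunk pos rem m
  | none => [(pos, rem)]

-- outer loop over indices, skipping in-core pages
def nprB_outer (im : Int) (mrl : Option Int) : List Int → Int → List (Int × Int)
  | [], _ => []
  | x :: t, i =>
      if h : PySem.Int.band x im ≠ 0 then nprB_outer im mrl t (i + 1)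
      else
        nprB_chunkO i ((nprB_run im (x :: t)).1 : Int) mrl ++
          nprB_outer im mrl (nprB_run im (x :: t)).2 (i + ((nprB_run im (x :: t)).1 : Int))
termination_by xs => xs.length
decreasing_by
  all_goals simp only [nprB_run, if_neg h, List.length_cons]
  all_goals have := nprB_run_len_le im t
  all_goals omega

def nonresident_page_regions_py_alt (status_bytes : List Int) (incore_mask : Int) (max_region_len : Option Int) : List (Int × Int) :=
  nprB_outer incore_mask max_region_len status_bytes 0

-- ===== PRECONDITION & SPEC =====
-- Pre_ excludes max_region_len = some m with m ≤ 0: there `assert(max_region_len is None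
-- or max_region_len > 0)` makes both A and B raise AssertionError when iterated.
def Pre_nonresident_page_regions_py (status_bytes : List Int) (incore_mask : Int) (max_region_len : Option Int) : Prop :=
  0 < max_region_len.getD 1
instance (status_bytes : List Int) (incore_mask : Int) (max_region_len : Option Int) : Decidable (Pre_nonresident_page_regions_py status_bytes incore_mask max_region_len) := by unfold Pre_nonresident_page_regions_py; infer_instance

def pvWitness_nonresident_page_regions_py : List Int × Int × Option Int := ([1, 0, 0, 0, 1, 0], 1, some 2)

def Spec_nonresident_page_regions_py (status_bytes : List Int) (incore_mask : Int) (max_region_len : Option Int) (out : List (Int × Int)) : Prop := out = nonresident_page_regions_py_alt status_bytes incore_mask max_region_len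
instance (status_bytes : List Int) (incore_mask : Int) (max_region_len : Option Int) (out : List (Int × Int)) : Decidable (Spec_nonresident_page_regions_py status_bytes incore_mask max_region_len out) := by unfold Spec_nonresident_page_regions_py; infer_instance

-- ===== CLAIM (what is proved, stated in full; the proofs are below) =====
def Claim_equal_nonresident_page_regions_py : Prop := ∀ (status_bytes : List Int) (incore_mask : Int) (max_region_len : Option Int), Dom_nonresident_page_regions_py status_bytes incore_mask max_region_len → Pre_nonresident_page_regions_py status_bytes incore_mask max_region_len → Spec_nonresident_page_regions_py status_bytes incore_mask max_region_len (nonresident_page_regions_py status_bytes incore_mask max_region_len)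

-- ===== LEMMAS AND PROOFS =====

theorem nprB_run_len_add (im : Int) (xs : List Int) :
    (nprB_run im xs).1 + (nprB_run im xs).2.length = xs.length := by
  induction xs with
  | nil => simp [nprB_run]
  | cons x t ih =>
      simp only [nprB_run]
      split
      · simp
      · simp only [List.length_cons]; omega

-- the run lemma: A's loop in state `some s` produces the chunked run followed by the
-- continuation of the loop in state `none` at the end of the run
theorem nprA_run (im : Int) (mrl : Option Int) (n : Int)
    (hPre : ∀ m, mrl = some m → 0 < m) :
    ∀ (xs : List Int) (i s : Int), n = i + xs.length → 1 ≤ i - s →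
      (∀ m, mrl = some m → i - s ≤ m) →
      nprA_loop im mrl n xs i (some s) =
        nprB_chunkO s (i - s + ((nprB_run im xs).1 : Int)) mrl ++
          nprA_loop im mrl n (nprB_run im xs).2 (i + ((nprB_run im xs).1 : Int)) none := by
  intro xs
  induction xs with
  | nil =>
      intro i s hn h1 hle
      have hchunk : nprB_chunkO s (i - s) mrl = [(s, i - s)] := by
        cases mrl with
        | none => rfl
        | some m =>
            have := hle m rfl
            simp only [nprB_chunkO]
            rw [nprB_chunk]
            simp [show ¬(0 < m ∧ m < i - s) by omega]
      have h0 : nprB_run im ([] : List Int) = (0, []) := rfl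
      rw [h0]
      simp only [Nat.cast_zero, add_zero]
      rw [hchunk]
      simp only [nprA_loop, List.cons_append, List.nil_append, List.cons.injEq, Prod.mk.injEq,
        true_and, and_true]
      simp at hn
      omega
  | cons x t ih =>
      intro i s hn h1 hle
      by_cases hc : PySem.Int.band x im ≠ 0
      · -- in-core: run ends here
        have hchunk : nprB_chunkO s (i - s) mrl = [(s, i - s)] := by
          cases mrl with
          | none => rfl
          | some m =>
              have := hle m rfl
              simp only [nprB_chunkO]
              rw [nprB_chunk]
              simp [show ¬(0 < m ∧ m < i - s) by omega]
        have hA : nprA_loop im mrl n (x :: t) i (some s) =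
            (s, i - s) :: nprA_loop im mrl n t (i + 1) none := by
          simp [nprA_loop, hc]
        have h0 : nprB_run im (x :: t) = (0, x :: t) := by simp [nprB_run, hc]
        have hN : nprA_loop im mrl n (x :: t) i none = nprA_loop im mrl n t (i + 1) none := by
          simp [nprA_loop, hc]
        rw [hA, h0]
        simp only [Nat.cast_zero, add_zero]
        rw [hchunk, hN]
        simp
      · -- nonresident: run continues
        simp only [ne_eq, not_not] at hc
        by_cases hsplit : ∃ m, mrl = some m ∧ m ≤ i - s
        · -- A splits: count = m exactly
          obtain ⟨m, hm, hms⟩ := hsplit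
          have hm0 := hPre m hm
          have hcount : i - s = m := le_antisymm (hle m hm) hms
          have hA : nprA_loop im mrl n (x :: t) i (some s) =
              (s, i - s) :: nprA_loop im mrl n t (i + 1) (some i) := by
            simp [nprA_loop, hc, hm, hms]
            exact fun h0 => absurd h0 (by omega)
          rw [hA, ih (i + 1) i (by simp at hn ⊢; omega) (by omega)
              (by intro m' hm'; rw [hm] at hm'; injection hm' with h; omega)]
          have hrun1 : ((nprB_run im (x :: t)).1 : Int) = ((nprB_run im t).1 : Int) + 1 := by
            simp [nprB_run, hc]
          have hrun2 : (nprB_run im (x :: t)).2 = (nprB_run im t).2 := by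
            simp [nprB_run, hc]
          rw [hrun1, hrun2, hm]
          simp only [nprB_chunkO]
          have hlt : 0 < m ∧ m < i - s + (((nprB_run im t).1 : Int) + 1) := by
            constructor; · omega
            · have : (0:Int) ≤ ((nprB_run im t).1 : Int) := Int.natCast_nonneg _
              omega
          have hout : nprB_chunk s (i - s + (((nprB_run im t).1 : Int) + 1)) m =
              (s, m) :: nprB_chunk i (i + 1 - i + ((nprB_run im t).1 : Int)) m := by
            rw [nprB_chunk, dif_pos hlt]
            have e1 : s + m = i := by omega
            have e2 : i - s + (((nprB_run im t).1 : Int) + 1) - m = i + 1 - i + ((nprB_run im t).1 : Int) := by omega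
            rw [e1, e2]
          rw [hout]
          have e3 : i + (((nprB_run im t).1 : Int) + 1) = i + 1 + ((nprB_run im t).1 : Int) := by omega
          rw [e3, hcount]
          simp
        · -- A keeps scanning the run
          have hA : nprA_loop im mrl n (x :: t) i (some s) =
              nprA_loop im mrl n t (i + 1) (some s) := by
            cases mrl with
            | none => simp [nprA_loop, hc]
            | some m =>
                have : ¬ m ≤ i - s := fun h => hsplit ⟨m, rfl, h⟩
                simp [nprA_loop, hc, this]
          rw [hA, ih (i + 1) s (by simp at hn ⊢; omega) (by omega)
              (by intro m hm
                  have h1 : ¬ m ≤ i - s := fun h => hsplit ⟨m, hm, h⟩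
                  omega)]
          have hrun1 : ((nprB_run im (x :: t)).1 : Int) = ((nprB_run im t).1 : Int) + 1 := by
            simp [nprB_run, hc]
          have hrun2 : (nprB_run im (x :: t)).2 = (nprB_run im t).2 := by
            simp [nprB_run, hc]
          rw [hrun1, hrun2]
          have e1 : i + 1 - s + ((nprB_run im t).1 : Int) = i - s + (((nprB_run im t).1 : Int) + 1) := by omega
          have e2 : i + 1 + ((nprB_run im t).1 : Int) = i + (((nprB_run im t).1 : Int) + 1) := by omega
          rw [e1, e2]

-- the skip lemma: A's loop in state `none` equals B's outer loop (strong induction on length)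
theorem nprA_none (im : Int) (mrl : Option Int) (n : Int)
    (hPre : ∀ m, mrl = some m → 0 < m) :
    ∀ (k : Nat) (xs : List Int) (i : Int), xs.length ≤ k → n = i + xs.length →
      nprA_loop im mrl n xs i none = nprB_outer im mrl xs i := by
  intro k
  induction k with
  | zero =>
      intro xs i hk hn
      have : xs = [] := List.eq_nil_of_length_eq_zero (Nat.le_zero.mp hk)
      subst this
      rw [nprB_outer]
      rfl
  | succ k ih =>
      intro xs i hk hn
      cases xs with
      | nil => rw [nprB_outer]; rfl
      | cons x t =>
          by_cases hc : PySem.Int.band x im ≠ 0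
          · rw [show nprA_loop im mrl n (x :: t) i none = nprA_loop im mrl n t (i + 1) none by
                  simp [nprA_loop, hc],
                ih t (i + 1) (by simp at hk; omega) (by simp at hn ⊢; omega)]
            rw [nprB_outer]
            simp [hc]
          · simp only [ne_eq, not_not] at hc
            have hA : nprA_loop im mrl n (x :: t) i none = nprA_loop im mrl n t (i + 1) (some i) := by
              simp [nprA_loop, hc]
            rw [hA, nprA_run im mrl n hPre t (i + 1) i (by simp at hn ⊢; omega) (by omega)
                (by intro m hm; have := hPre m hm; omega)]
            have hrun1 : ((nprB_run im (x :: t)).1 : Int) = ((nprB_run im t).1 : Int) + 1 := by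
              simp [nprB_run, hc]
            have hrun2 : (nprB_run im (x :: t)).2 = (nprB_run im t).2 := by
              simp [nprB_run, hc]
            have hB : nprB_outer im mrl (x :: t) i =
                nprB_chunkO i ((nprB_run im (x :: t)).1 : Int) mrl ++
                  nprB_outer im mrl (nprB_run im (x :: t)).2 (i + ((nprB_run im (x :: t)).1 : Int)) := by
              rw [nprB_outer]
              simp [hc]

            rw [hB, hrun1, hrun2]
            have e1 : i + 1 - i + ((nprB_run im t).1 : Int) = ((nprB_run im t).1 : Int) + 1 := by omega
            have e2 : i + 1 + ((nprB_run im t).1 : Int) = i + (((nprB_run im t).1 : Int) + 1) := by omega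
            rw [e1, e2]
            congr 1
            have hlen := nprB_run_len_add im t
            exact ih _ _ (by simp at hk; omega) (by simp at hn ⊢; omega)

-- ===== VERDICT (by name: the statement is the Claim_ definition above) =====
theorem nonresident_page_regions_py_spec : Claim_equal_nonresident_page_regions_py := by
  intro sb im mrl _hDom hPre
  unfold Spec_nonresident_page_regions_py nonresident_page_regions_py nonresident_page_regions_py_alt
  refine nprA_none im mrl (sb.length : Int) ?_ sb.length sb 0 le_rfl (by simp)
  intro m hm
  unfold Pre_nonresident_page_regions_py at hPre
  rw [hm] at hPre
  simpa using hPre
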